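-- pv_equiv track=rewrite | github.com/kiranpagar123/certification_final_exam | bob.py | count_duplicate_pairs
-- ===== SOURCE A (Python) =====
-- def count_duplicate_pairs(n, nums):
--     # convert each number to binary form and compute sum of bits
--     sums = [bin(num).count('1') for num in nums]
--
--     # create dictionary that maps each sum to a list of numbers
--     num_dict = {}
--     for i in range(n):
--         if sums[i] in num_dict:
--             num_dict[sums[i]].append(nums[i])
--         else:
--             num_dict[sums[i]] = [nums[i]]
--
--     # count duplicate pairs for each list of numbers with the same sum
--     count = 0
--     for key in num_dict:
--         lst = num_dict[key]
--         if len(lst) >= 2: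
--             count += len(lst) * (len(lst) - 1) // 2
--
--     return count
-- ===== SOURCE B (Python) =====
-- def count_duplicate_pairs(n, nums):
--     # single pass: for each element, add the number of earlier elements with the
--     # same popcount; seen maps popcount -> how many seen so far
--     seen = {}
--     total = 0
--     for i in range(n):
--         p = bin(nums[i]).count('1')
--         total += seen.get(p, 0)
--         seen[p] = seen.get(p, 0) + 1
--     return total
-- ===== Notes on version B (the rewrite author's own statement) =====
-- stated objective: alternative
-- what changed: B fuses A's three phases (precompute all popcounts, group the numbers into lists keyed by popcount, then sum len*(len-1)//2 per group) into one accumulating pass that keeps only per-popcount counts and adds the count seen so far for each element, with no list storage and no combination formula.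
import Mathlib
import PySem

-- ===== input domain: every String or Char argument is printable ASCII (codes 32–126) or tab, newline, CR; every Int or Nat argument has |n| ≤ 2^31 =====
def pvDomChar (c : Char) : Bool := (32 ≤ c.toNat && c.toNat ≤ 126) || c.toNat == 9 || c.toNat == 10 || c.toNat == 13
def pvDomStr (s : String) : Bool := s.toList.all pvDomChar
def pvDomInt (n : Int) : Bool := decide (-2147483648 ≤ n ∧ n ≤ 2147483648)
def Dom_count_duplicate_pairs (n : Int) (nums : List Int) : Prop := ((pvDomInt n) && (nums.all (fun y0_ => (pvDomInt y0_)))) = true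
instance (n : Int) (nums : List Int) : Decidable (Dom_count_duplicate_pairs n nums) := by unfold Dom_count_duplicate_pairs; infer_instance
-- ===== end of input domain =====

-- B replaces A's three phases (popcount list, dict of grouped numbers, per-group C(len,2) sum)
-- by a single accumulating pass keeping only per-popcount counts; same return value ('alternative').

-- bin(num).count('1'), the popcount expression both versions share
def pvPopcount (num : Int) : Int := (PySem.Str.count (PySem.Int.pyBin num) "1" : Int)

-- ===== PORT A =====
def count_duplicate_pairs (n : Int) (nums : List Int) : Int :=
  -- sums = [bin(num).count('1') for num in nums]
  let sums := nums.map pvPopcount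
  -- for i in range(n): append nums[i] to num_dict[sums[i]] (new list if key absent)
  let num_dict := (PySem.List.pyRange 0 n 1).foldl (fun d i =>
      if PySem.Dict.contains d (PySem.List.pyGetD sums i 0) then
        PySem.Dict.insert d (PySem.List.pyGetD sums i 0)
          (PySem.Dict.getD d (PySem.List.pyGetD sums i 0) [] ++ [PySem.List.pyGetD nums i 0])
      else
        PySem.Dict.insert d (PySem.List.pyGetD sums i 0) [PySem.List.pyGetD nums i 0])
    PySem.Dict.empty
  -- for key in num_dict: count += len(lst)*(len(lst)-1)//2 when len(lst) >= 2
  num_dict.keys.foldl (fun count key =>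
      let lst := PySem.Dict.getD num_dict key []
      if 2 ≤ (lst.length : Int) then
        count + PySem.Int.floordiv ((lst.length : Int) * ((lst.length : Int) - 1)) 2
      else count) 0

-- ===== PORT B =====
def count_duplicate_pairs_alt (n : Int) (nums : List Int) : Int :=
  -- seen = {}; total = 0; for i in range(n): total += seen.get(p,0); seen[p] = seen.get(p,0)+1
  ((PySem.List.pyRange 0 n 1).foldl (fun st i =>
      let p := pvPopcount (PySem.List.pyGetD nums i 0)
      (PySem.Dict.insert st.1 p (PySem.Dict.getD st.1 p 0 + 1),
       st.2 + PySem.Dict.getD st.1 p 0))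
    ((PySem.Dict.empty : PySem.Dict Int Int), (0 : Int))).2

-- ===== PRECONDITION & SPEC =====
-- Pre_ excludes exactly the inputs where A raises IndexError: n beyond the list length
-- (nums[i] / sums[i] for some i in range(n)).
def Pre_count_duplicate_pairs (n : Int) (nums : List Int) : Prop := n ≤ (nums.length : Int)
instance (n : Int) (nums : List Int) : Decidable (Pre_count_duplicate_pairs n nums) := by
  unfold Pre_count_duplicate_pairs; infer_instance
def pvWitness_count_duplicate_pairs : Int × List Int := (3, [3, 5, 4, 6])

def Spec_count_duplicate_pairs (n : Int) (nums : List Int) (out : Int) : Prop := out = count_duplicate_pairs_alt n nums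
instance (n : Int) (nums : List Int) (out : Int) : Decidable (Spec_count_duplicate_pairs n nums out) := by unfold Spec_count_duplicate_pairs; infer_instance

-- ===== CLAIM (what is proved, stated in full; the proofs are below) =====
def Claim_equal_count_duplicate_pairs : Prop := ∀ (n : Int) (nums : List Int), Dom_count_duplicate_pairs n nums → Pre_count_duplicate_pairs n nums → Spec_count_duplicate_pairs n nums (count_duplicate_pairs n nums)

-- ===== LEMMAS AND PROOFS =====

-- C(c,2) as both programs' arithmetic produces it
def pvC2 (c : Nat) : Int := PySem.Int.floordiv ((c : Int) * ((c : Int) - 1)) 2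

-- number of equal-popcount pairs of a popcount list, in grouped form
def pvPairSum (ps : List Int) : Int :=
  ((PySem.Set.ofList ps).map (fun k => pvC2 (ps.count k))).sum

theorem pvC2_zero : pvC2 0 = 0 := by decide
theorem pvC2_one : pvC2 1 = 0 := by decide

theorem pvC2_succ (c : Nat) : pvC2 (c + 1) = pvC2 c + (c : Int) := by
  unfold pvC2
  cases c with
  | zero => decide
  | succ c =>
    have h1 : ((c + 1 + 1 : Nat) : Int) * ((c + 1 + 1 : Nat) - 1) = (((c + 2) * (c + 1) : Nat) : Int) := by
      push_cast; ring
    have h2 : ((c + 1 : Nat) : Int) * ((c + 1 : Nat) - 1) = (((c + 1) * c : Nat) : Int) := by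
      push_cast; ring
    have e1 : PySem.Int.floordiv ((((c + 2) * (c + 1) : Nat)) : Int) 2 = (((c + 2) * (c + 1) / 2 : Nat) : Int) := by
      exact_mod_cast PySem.Int.floordiv_natCast ((c + 2) * (c + 1)) 2
    have e2 : PySem.Int.floordiv ((((c + 1) * c : Nat)) : Int) 2 = (((c + 1) * c / 2 : Nat) : Int) := by
      exact_mod_cast PySem.Int.floordiv_natCast ((c + 1) * c) 2
    rw [h1, h2, e1, e2]
    have : (c + 2) * (c + 1) / 2 = (c + 1) * c / 2 + (c + 1) := by
      have e5 : (c + 2) * (c + 1) = (c + 1) * c + (c + 1) * 2 := by ring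
      rw [e5, Nat.add_mul_div_right _ _ (by norm_num : 0 < 2)]
    rw [this]; push_cast; ring

-- a nodup list containing p: summing 'if k = p then c else 0' gives c
theorem pv_sum_ite_single (s : List Int) (p : Int) (c : Int) (hnd : s.Nodup) (hp : p ∈ s) :
    (s.map (fun k => if k = p then c else 0)).sum = c := by
  induction s with
  | nil => cases hp
  | cons a t ih =>
    by_cases hax : a = p
    · subst hax
      have hnt : a ∉ t := (List.nodup_cons.mp hnd).1
      have hz : (t.map (fun k => if k = a then c else 0)).sum = 0 := by
        apply List.sum_eq_zero
        intro y hy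
        rcases List.mem_map.mp hy with ⟨k, hk, rfl⟩
        have : k ≠ a := by rintro rfl; exact hnt hk
        simp [this]
      simp [hz]
    · have hpt : p ∈ t := by
        rcases List.mem_cons.mp hp with h | h
        · exact absurd h.symm hax
        · exact h
      simp [hax, ih (List.nodup_cons.mp hnd).2 hpt]

theorem pvSet_ofList_append (ps : List Int) (p : Int) :
    PySem.Set.ofList (ps ++ [p])
      = if p ∈ ps then PySem.Set.ofList ps else PySem.Set.ofList ps ++ [p] := by
  rw [PySem.Set.ofList_eq_foldl, List.foldl_append, ← PySem.Set.ofList_eq_foldl]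
  simp only [List.foldl_cons, List.foldl_nil]
  by_cases h : p ∈ ps
  · simp [PySem.Set.add, PySem.Set.contains, PySem.Set.mem_ofList, h]
  · simp [PySem.Set.add, PySem.Set.contains, PySem.Set.mem_ofList, h]

-- the incremental-accumulation identity: appending one popcount adds 'count so far'
theorem pvPairSum_append (ps : List Int) (p : Int) :
    pvPairSum (ps ++ [p]) = pvPairSum ps + (ps.count p : Int) := by
  by_cases h : p ∈ ps
  · unfold pvPairSum
    rw [pvSet_ofList_append, if_pos h]
    have hmap : ∀ k ∈ PySem.Set.ofList ps,
        pvC2 ((ps ++ [p]).count k)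
          = pvC2 (ps.count k) + (if k = p then (ps.count p : Int) else 0) := by
      intro k hk
      by_cases hkp : k = p
      · subst hkp
        have hc : (ps ++ [k]).count k = ps.count k + 1 := by
          simp [List.count_append]
        rw [hc, pvC2_succ, if_pos rfl]
      · have hc : (ps ++ [p]).count k = ps.count k := by
          simp [List.count_append, Ne.symm hkp]
        rw [hc, if_neg hkp]
        simp
    rw [List.map_congr_left hmap, PySem.List.sum_map_add_int,
      pv_sum_ite_single _ p _ (PySem.Set.nodup_ofList ps)
        ((PySem.Set.mem_ofList ps p).mpr h)]
  · unfold pvPairSum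
    rw [pvSet_ofList_append, if_neg h]
    have hmap : ∀ k ∈ PySem.Set.ofList ps, pvC2 ((ps ++ [p]).count k) = pvC2 (ps.count k) := by
      intro k hk
      have hkp : k ≠ p := by
        rintro rfl; exact h ((PySem.Set.mem_ofList ps k).mp hk)
      have hc : (ps ++ [p]).count k = ps.count k := by
        simp [List.count_append, Ne.symm hkp]
      rw [hc]
    have hcp : ps.count p = 0 := List.count_eq_zero.mpr h
    have hnew : (ps ++ [p]).count p = 1 := by
      simp [List.count_append, hcp]
    rw [List.map_append, List.sum_append, List.map_congr_left hmap]
    simp [pvC2_one, hcp]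

-- B restricted to a popcount list: state is (counts dict, running total)
def pvStepB (st : PySem.Dict Int Int × Int) (p : Int) : PySem.Dict Int Int × Int :=
  (PySem.Dict.insert st.1 p (PySem.Dict.getD st.1 p 0 + 1), st.2 + PySem.Dict.getD st.1 p 0)

theorem pvB_fold (ps : List Int) :
    ps.foldl pvStepB ((PySem.Dict.empty : PySem.Dict Int Int), (0 : Int))
      = (ps.foldl (fun d x => PySem.Dict.insert d x (PySem.Dict.getD d x 0 + 1)) PySem.Dict.empty,
         pvPairSum ps) := by
  induction ps using List.reverseRecOn with
  | nil => simp [pvPairSum, PySem.Set.ofList]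
  | append_singleton t p ih =>
    rw [List.foldl_append, List.foldl_append, ih]
    unfold pvStepB
    simp only [List.foldl_cons, List.foldl_nil]
    refine Prod.ext rfl ?_
    simp only
    rw [pvPairSum_append, PySem.Dict.getD_foldl_insert_add_one t PySem.Dict.empty p]
    simp

-- A's dict-building step is exactly a modify-with-append
theorem pvStepA_eq_modify (d : PySem.Dict Int (List Int)) (s : Int) (v : Int) :
    (if PySem.Dict.contains d s then
        PySem.Dict.insert d s (PySem.Dict.getD d s [] ++ [v])
      else PySem.Dict.insert d s [v])
      = PySem.Dict.modify d s [] (· ++ [v]) := by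
  by_cases h : PySem.Dict.contains d s
  · simp [h, PySem.Dict.modify]
  · rw [if_neg h, PySem.Dict.modify,
      PySem.Dict.getD_of_not_contains d [] (Bool.not_eq_true _ ▸ by simpa using h)]
    simp

-- generic range-with-indexing → fold over the taken prefix
theorem pv_fold_range_take {β : Type} (nums : List Int) (n : Int) (hn : n ≤ (nums.length : Int))
    (f : β → Int → β) (init : β) :
    (PySem.List.pyRange 0 n 1).foldl (fun acc i => f acc (PySem.List.pyGetD nums i 0)) init
      = (nums.take n.toNat).foldl f init := by
  rcases le_or_gt n 0 with h | h
  · rw [PySem.List.pyRange_one_eq_nil h]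
    have : n.toNat = 0 := by omega
    simp [this]
  · have hlen : ((nums.take n.toNat).length : Int) = n := by
      rw [List.length_take]; omega
    have key := PySem.List.foldl_pyRange_zero_pyGetD' (nums.take n.toNat) 0 f init
    rw [hlen] at key
    rw [← key]
    apply PySem.List.foldl_congr_mem
    intro acc i hi
    rcases PySem.List.mem_pyRange_one.mp hi with ⟨h0, h1⟩
    show f acc (PySem.List.pyGetD nums i 0) = f acc (PySem.List.pyGetD (nums.take n.toNat) i 0)
    rw [PySem.List.pyGetD_eq_getElem nums 0 h0 (by omega),
      PySem.List.pyGetD_eq_getElem (nums.take n.toNat) 0 h0 (by rw [hlen]; exact h1)]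
    congr 1
    rw [List.getElem_take]

-- A's grouped count equals pvPairSum of the popcounts of the processed prefix
theorem pvA_counts (xs : List Int) :
    (let dA := xs.foldl (fun d x => PySem.Dict.modify d (pvPopcount x) [] (· ++ [x]))
        (PySem.Dict.empty : PySem.Dict Int (List Int))
     dA.keys.foldl (fun count key =>
        let lst := PySem.Dict.getD dA key []
        if 2 ≤ (lst.length : Int) then
          count + PySem.Int.floordiv ((lst.length : Int) * ((lst.length : Int) - 1)) 2
        else count) 0)
      = pvPairSum (xs.map pvPopcount) := by
  simp only
  set dA := xs.foldl (fun d x => PySem.Dict.modify d (pvPopcount x) [] (· ++ [x]))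
      (PySem.Dict.empty : PySem.Dict Int (List Int)) with hdA
  -- the dict as a pair fold, to use the library lemmas
  have hdA' : dA = (xs.map (fun x => (pvPopcount x, x))).foldl
      (fun d p => PySem.Dict.modify d p.1 [] (· ++ [p.2])) PySem.Dict.empty := by
    rw [hdA, List.foldl_map]
  have hkeys : dA.keys = PySem.Set.ofList (xs.map pvPopcount) := by
    rw [hdA, PySem.Dict.keys_foldl_modify_key xs pvPopcount [] (fun _ x l => l ++ [x])
      PySem.Dict.empty]
    simp [PySem.Dict.keys_empty, PySem.Set.update_nil_left]
  have hgetD : ∀ k, (PySem.Dict.getD dA k []).length = (xs.map pvPopcount).count k := by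
    intro k
    rw [hdA', PySem.Dict.getD_foldl_modify_append (xs.map (fun x => (pvPopcount x, x)))
      PySem.Dict.empty k]
    simp only [PySem.Dict.getD_empty, List.nil_append, List.length_map, List.filter_map]
    rw [List.count_eq_countP, ← List.countP_eq_length_filter]
    simp [Function.comp_def]
  have hbody : ∀ (count : Int), ∀ k ∈ dA.keys,
      (let lst := PySem.Dict.getD dA k []
       if 2 ≤ (lst.length : Int) then
         count + PySem.Int.floordiv ((lst.length : Int) * ((lst.length : Int) - 1)) 2
       else count)
        = count + pvC2 ((xs.map pvPopcount).count k) := by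
    intro count k hk
    simp only
    rw [hgetD k]
    set c := (xs.map pvPopcount).count k with hc
    by_cases h2 : 2 ≤ (c : Int)
    · rw [if_pos h2]; rfl
    · rw [if_neg h2]
      have : c = 0 ∨ c = 1 := by omega
      rcases this with h | h <;> rw [h]
      · rw [pvC2_zero]; ring
      · rw [pvC2_one]; ring
  rw [PySem.List.foldl_congr_mem _ _ (fun count k => count + pvC2 ((xs.map pvPopcount).count k)) 0 hbody]
  rw [PySem.List.foldl_add]
  rw [hkeys]
  unfold pvPairSum
  have : ∀ k ∈ PySem.Set.ofList (xs.map pvPopcount),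
      pvC2 ((xs.map pvPopcount).count k) = pvC2 (((xs.map pvPopcount)).count k) := fun _ _ => rfl
  simp

-- the two ports evaluated: each equals pvPairSum of the processed prefix's popcounts
theorem pv_pyGetD_map_popcount (nums : List Int) (i : Int) (h0 : 0 ≤ i)
    (h1 : i < (nums.length : Int)) :
    PySem.List.pyGetD (nums.map pvPopcount) i 0 = pvPopcount (PySem.List.pyGetD nums i 0) := by
  rw [PySem.List.pyGetD_eq_getElem nums 0 h0 h1,
    PySem.List.pyGetD_eq_getElem (nums.map pvPopcount) 0 h0 (by simpa using h1)]
  simp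

theorem pvA_eq (n : Int) (nums : List Int) (hn : n ≤ (nums.length : Int)) :
    count_duplicate_pairs n nums = pvPairSum ((nums.take n.toNat).map pvPopcount) := by
  unfold count_duplicate_pairs
  simp only
  have hc : ∀ (d : PySem.Dict Int (List Int)), ∀ i ∈ PySem.List.pyRange 0 n 1,
      (if PySem.Dict.contains d (PySem.List.pyGetD (nums.map pvPopcount) i 0) then
        PySem.Dict.insert d (PySem.List.pyGetD (nums.map pvPopcount) i 0)
          (PySem.Dict.getD d (PySem.List.pyGetD (nums.map pvPopcount) i 0) [] ++ [PySem.List.pyGetD nums i 0])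
      else
        PySem.Dict.insert d (PySem.List.pyGetD (nums.map pvPopcount) i 0) [PySem.List.pyGetD nums i 0])
        = PySem.Dict.modify d (pvPopcount (PySem.List.pyGetD nums i 0)) [] (· ++ [PySem.List.pyGetD nums i 0]) := by
    intro d i hi
    rcases PySem.List.mem_pyRange_one.mp hi with ⟨h0, h1⟩
    rw [pv_pyGetD_map_popcount nums i h0 (by omega)]
    exact pvStepA_eq_modify d (pvPopcount (PySem.List.pyGetD nums i 0)) (PySem.List.pyGetD nums i 0)
  have hfold : (PySem.List.pyRange 0 n 1).foldl
      (fun d i =>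
        if PySem.Dict.contains d (PySem.List.pyGetD (nums.map pvPopcount) i 0) then
          PySem.Dict.insert d (PySem.List.pyGetD (nums.map pvPopcount) i 0)
            (PySem.Dict.getD d (PySem.List.pyGetD (nums.map pvPopcount) i 0) [] ++ [PySem.List.pyGetD nums i 0])
        else
          PySem.Dict.insert d (PySem.List.pyGetD (nums.map pvPopcount) i 0) [PySem.List.pyGetD nums i 0])
      (PySem.Dict.empty : PySem.Dict Int (List Int))
      = (nums.take n.toNat).foldl
          (fun d x => PySem.Dict.modify d (pvPopcount x) [] (· ++ [x])) PySem.Dict.empty := by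
    rw [PySem.List.foldl_congr_mem _ _
      (fun d i => PySem.Dict.modify d (pvPopcount (PySem.List.pyGetD nums i 0)) [] (· ++ [PySem.List.pyGetD nums i 0]))
      _ hc]
    exact pv_fold_range_take nums n hn
      (fun d x => PySem.Dict.modify d (pvPopcount x) [] (· ++ [x])) _
  rw [hfold]
  exact pvA_counts (nums.take n.toNat)

theorem pvB_eq (n : Int) (nums : List Int) (hn : n ≤ (nums.length : Int)) :
    count_duplicate_pairs_alt n nums = pvPairSum ((nums.take n.toNat).map pvPopcount) := by
  unfold count_duplicate_pairs_alt
  have h1 : (PySem.List.pyRange 0 n 1).foldl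
      (fun st i =>
        let p := pvPopcount (PySem.List.pyGetD nums i 0)
        (PySem.Dict.insert st.1 p (PySem.Dict.getD st.1 p 0 + 1),
         st.2 + PySem.Dict.getD st.1 p 0))
      ((PySem.Dict.empty : PySem.Dict Int Int), (0 : Int))
      = (nums.take n.toNat).foldl (fun st x => pvStepB st (pvPopcount x)) (PySem.Dict.empty, 0) :=
    pv_fold_range_take nums n hn (fun st x => pvStepB st (pvPopcount x)) _
  rw [h1, ← List.foldl_map, pvB_fold]

-- ===== VERDICT (by name: the statement is the Claim_ definition above) =====
theorem count_duplicate_pairs_spec : Claim_equal_count_duplicate_pairs := by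
  intro n nums _ hpre
  unfold Spec_count_duplicate_pairs
  rw [pvA_eq n nums hpre, pvB_eq n nums hpre]
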